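-- pv_equiv track=rewrite | github.com/jhilio/call_me_maybe | src/llm_interaction.py | group_text
-- ===== SOURCE A (Python) =====
-- def group_text(spans):
--     """
--     merges consecutive normal chars into strings
--     keeps special tokens separate
--     """
--     out = []
--     buffer = ""
--
--     for is_special, val in spans:
--         if not is_special:
--             buffer += val
--         else:
--             if buffer:
--                 out.append((False, buffer))
--                 buffer = ""
--             out.append((True, val))
--
--     if buffer:
--         out.append((False, buffer))
--
--     return out
-- ===== SOURCE B (Python) =====
-- def group_text(spans):
--     """
--     merges consecutive normal chars into strings
--     keeps special tokens separate
--     """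
--     out = []
--     i = 0
--     n = len(spans)
--     while i < n:
--         flag = spans[i][0]
--         j = i
--         while j < n and spans[j][0] == flag:
--             j += 1
--         run = spans[i:j]
--         if flag:
--             out.extend(run)
--         else:
--             joined = "".join(v for _, v in run)
--             if joined:
--                 out.append((False, joined))
--         i = j
--     return out
-- ===== Notes on version B (the rewrite author's own statement) =====
-- stated objective: alternative
-- what changed: B splits the span list into maximal runs of equal is_special flag and emits each run at once (true runs verbatim, false runs joined if non-empty), instead of A's single element-wise pass with a buffer and end-of-loop flush.
import Mathlib
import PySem

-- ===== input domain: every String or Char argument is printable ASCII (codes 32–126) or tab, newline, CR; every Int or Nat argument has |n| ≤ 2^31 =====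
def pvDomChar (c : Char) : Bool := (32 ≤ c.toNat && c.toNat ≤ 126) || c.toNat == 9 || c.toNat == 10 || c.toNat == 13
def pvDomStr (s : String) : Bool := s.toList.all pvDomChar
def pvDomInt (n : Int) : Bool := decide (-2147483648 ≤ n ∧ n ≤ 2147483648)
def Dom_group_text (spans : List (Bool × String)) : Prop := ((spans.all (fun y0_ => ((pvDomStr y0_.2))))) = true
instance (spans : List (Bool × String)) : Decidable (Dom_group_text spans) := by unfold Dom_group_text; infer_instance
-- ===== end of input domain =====

-- B restructures A's element-wise buffer/flush pass into a run-at-a-time pass over maximal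
-- runs of equal is_special flag (objective: alternative decomposition, same cost).

-- ===== PORT A =====
-- A: one fold over spans carrying (out, buffer); flush buffer at special tokens and at the end.
def group_text (spans : List (Bool × String)) : List (Bool × String) :=
  let st := spans.foldl (fun (st : List (Bool × String) × String) p =>
    if !p.1 then (st.1, st.2 ++ p.2)
    else ((if st.2 ≠ "" then st.1 ++ [(false, st.2)] else st.1) ++ [(true, p.2)], ""))
    ([], "")
  if st.2 ≠ "" then st.1 ++ [(false, st.2)] else st.1

-- ===== PORT B =====
-- B: take the maximal run sharing the head's flag, emit it (verbatim if special,
-- joined and only-if-nonempty otherwise), recurse on the rest.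
def group_text_alt (spans : List (Bool × String)) : List (Bool × String) :=
  match spans with
  | [] => []
  | (flag, v) :: rest =>
    let run := (flag, v) :: rest.takeWhile (fun p => p.1 == flag)
    let rest' := rest.dropWhile (fun p => p.1 == flag)
    (if flag then run
     else
       let joined := String.join (run.map (·.2))
       if joined = "" then [] else [(false, joined)]) ++ group_text_alt rest'
termination_by spans.length
decreasing_by
  simp only [List.length_cons]
  exact Nat.lt_succ_of_le (List.length_dropWhile_le _ _)

-- ===== PRECONDITION & SPEC =====
def Spec_group_text (spans : List (Bool × String)) (out : List (Bool × String)) : Prop := out = group_text_alt spans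
instance (spans : List (Bool × String)) (out : List (Bool × String)) : Decidable (Spec_group_text spans out) := by unfold Spec_group_text; infer_instance

-- ===== CLAIM =====
def Claim_equal_group_text : Prop := ∀ (spans : List (Bool × String)), Dom_group_text spans → Spec_group_text spans (group_text spans)

-- ===== LEMMAS AND PROOFS =====

theorem join_singleton (s : String) : String.join [s] = s := by
  simp [String.join]

theorem alt_false_false (b v : String) (rest : List (Bool × String)) :
    group_text_alt ((false, b) :: (false, v) :: rest) = group_text_alt ((false, b ++ v) :: rest) := by
  rw [group_text_alt, group_text_alt]
  simp [String.join]

theorem alt_true_cons (v : String) (rest : List (Bool × String)) :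
    group_text_alt ((true, v) :: rest) = (true, v) :: group_text_alt rest := by
  rw [group_text_alt]
  match rest with
  | [] => simp [group_text_alt]
  | (true, w) :: r =>
      conv_rhs => rw [group_text_alt]
      simp
  | (false, w) :: r => simp

theorem alt_false_empty (rest : List (Bool × String)) :
    group_text_alt ((false, "") :: rest) = group_text_alt rest := by
  match rest with
  | [] => rw [group_text_alt]; simp [group_text_alt, join_singleton]
  | (true, w) :: r => rw [group_text_alt]; simp [join_singleton]
  | (false, w) :: r => rw [alt_false_false]; simp

theorem alt_false_true (b v : String) (rest : List (Bool × String)) :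
    group_text_alt ((false, b) :: (true, v) :: rest) =
      (if b = "" then [] else [(false, b)]) ++ (true, v) :: group_text_alt rest := by
  rw [group_text_alt]
  simp [alt_true_cons, join_singleton]

theorem loop_eq (spans : List (Bool × String)) :
    ∀ (out : List (Bool × String)) (b : String),
    (let st := spans.foldl (fun (st : List (Bool × String) × String) p =>
        if !p.1 then (st.1, st.2 ++ p.2)
        else ((if st.2 ≠ "" then st.1 ++ [(false, st.2)] else st.1) ++ [(true, p.2)], ""))
        (out, b)
     if st.2 ≠ "" then st.1 ++ [(false, st.2)] else st.1)
    = out ++ group_text_alt ((false, b) :: spans) := by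
  induction spans with
  | nil =>
      intro out b
      rw [group_text_alt]
      by_cases hb : b = "" <;> simp [hb, join_singleton, group_text_alt]
  | cons p rest ih =>
      intro out b
      obtain ⟨flag, v⟩ := p
      cases flag with
      | false => simpa [alt_false_false] using ih out (b ++ v)
      | true =>
          rw [alt_false_true]
          by_cases hb : b = "" <;>
            simpa [hb, alt_false_empty, List.append_assoc] using
              ih ((if b ≠ "" then out ++ [(false, b)] else out) ++ [(true, v)]) ""

-- ===== VERDICT =====
theorem group_text_spec : Claim_equal_group_text := by
  intro spans _
  unfold Spec_group_text group_text
  have h := loop_eq spans [] ""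
  simpa [alt_false_empty] using h
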